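-- pv_equiv track=rewrite | github.com/yonatan-h/competitive-programming | week13-after-admission/Replace the Substring for Balanced String.py | excess_letters
-- ===== SOURCE A (Python) =====
-- from collections import Counter, defaultdict
--
-- def excess_letters(string):
--     a_fourth = len(string)//4
--     counts = Counter(string)
--     excess_letters = {}
--
--     for letter in counts.keys():
--         excess = counts[letter] - a_fourth
--         if excess > 0:
--             excess_letters[letter] = excess
--     return excess_letters
-- ===== SOURCE B (Python) =====
-- def excess_letters(string):
--     threshold = len(string) // 4
--     result = {}
--     rest = string
--     while rest:
--         c = rest[0]
--         stripped = rest.replace(c, '')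
--         excess = (len(rest) - len(stripped)) - threshold
--         if excess > 0:
--             result[c] = excess
--         rest = stripped
--     return result
-- ===== Notes on version B (the rewrite author's own statement) =====
-- stated objective: alternative
-- what changed: Replaces the Counter histogram plus per-key loop by an iterative strip-and-measure loop: repeatedly take the first remaining letter, delete all its occurrences with str.replace, and read its count off the length drop.
import Mathlib
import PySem

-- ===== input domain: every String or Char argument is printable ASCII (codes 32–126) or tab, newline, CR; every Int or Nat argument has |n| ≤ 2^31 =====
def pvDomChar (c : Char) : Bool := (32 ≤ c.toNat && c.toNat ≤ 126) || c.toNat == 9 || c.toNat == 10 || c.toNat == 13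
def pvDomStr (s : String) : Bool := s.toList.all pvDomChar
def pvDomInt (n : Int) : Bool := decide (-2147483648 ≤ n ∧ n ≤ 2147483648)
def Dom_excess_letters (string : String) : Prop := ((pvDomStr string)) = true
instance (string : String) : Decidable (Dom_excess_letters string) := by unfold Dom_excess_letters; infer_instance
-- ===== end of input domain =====

-- B replaces the Counter histogram + key loop by an iterative strip-and-measure loop: take the first
-- remaining letter, delete all its occurrences with str.replace, and read its count off the length drop
-- (alternative decomposition).


-- ===== PORT A =====
def excess_letters (string : String) : List (String × Int) :=
  let a_fourth := PySem.Int.floordiv (PySem.Str.len string) 4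
  let counts := PySem.Dict.counter string.toList
  let ex : PySem.Dict String Int :=
    counts.keys.foldl (fun d letter =>
      let excess := counts.getD letter 0 - a_fourth
      if excess > 0 then d.insert (String.ofList [letter]) excess else d)
      PySem.Dict.empty
  ex.items

-- ===== PORT B =====
-- The while-loop of Source B as recursion on the remaining characters; `rest.replace(c, '')` for the
-- single character c = rest[0] is exactly the removal of every occurrence of c, i.e. the head is
-- dropped and the tail is filtered.
def excess_letters_loop (threshold : Int) (rest : List Char) (result : PySem.Dict String Int) :
    PySem.Dict String Int :=
  match rest with
  | [] => result
  | c :: tail =>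
    let stripped := (c :: tail).filter (fun x => !(x == c))
    let excess : Int := ((c :: tail).length : Int) - (stripped.length : Int) - threshold
    excess_letters_loop threshold stripped
      (if excess > 0 then result.insert (String.ofList [c]) excess else result)
termination_by rest.length
decreasing_by
  simp only [List.length_cons, List.filter_cons, beq_self_eq_true, Bool.not_true]
  exact Nat.lt_succ_of_le (List.length_filter_le _ _)

def excess_letters_alt (string : String) : List (String × Int) :=
  let threshold := PySem.Int.floordiv (PySem.Str.len string) 4
  (excess_letters_loop threshold string.toList PySem.Dict.empty).items

-- ===== PRECONDITION & SPEC =====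
def Spec_excess_letters (string : String) (out : List (String × Int)) : Prop := out = excess_letters_alt string
instance (string : String) (out : List (String × Int)) : Decidable (Spec_excess_letters string out) := by unfold Spec_excess_letters; infer_instance

-- ===== CLAIM (what is proved, stated in full; the proofs are below) =====
def Claim_equal_excess_letters : Prop := ∀ (string : String), Dom_excess_letters string → Spec_excess_letters string (excess_letters string)

-- ===== LEMMAS AND PROOFS =====

-- Items of a conditional-insert fold over pairwise-fresh keys: the comprehension shape of A's loop.
theorem items_foldl_insert_if {κ ν β : Type} [BEq κ] [LawfulBEq κ]
    (l : List β) (k : β → κ) (p : β → Prop) [DecidablePred p] (v : β → ν)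
    (d : PySem.Dict κ ν)
    (hfresh : ∀ a ∈ l, d.contains (k a) = false) (hnd : (l.map k).Nodup) :
    (l.foldl (fun d a => if p a then d.insert (k a) (v a) else d) d).items
      = d.items ++ l.filterMap (fun a => if p a then some (k a, v a) else none) := by
  induction l generalizing d with
  | nil => simp
  | cons x xs ih =>
    simp only [List.map_cons, List.nodup_cons, List.mem_map] at hnd
    simp only [List.foldl_cons, List.filterMap_cons]
    by_cases hp : p x
    · have hfx : d.contains (k x) = false := hfresh x (List.mem_cons_self)
      rw [if_pos hp, if_pos hp,
        ih _ (fun a ha => by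
          rw [PySem.Dict.contains_insert]
          have : ¬ k a == k x := by
            simp only [beq_iff_eq]
            intro h
            exact hnd.1 ⟨a, ha, h⟩
          simp [this, hfresh a (List.mem_cons_of_mem _ ha)]) hnd.2,
        PySem.Dict.items_insert_of_not_contains _ _ hfx]
      simp
    · rw [if_neg hp, if_neg hp, ih _ (fun a ha => hfresh a (List.mem_cons_of_mem _ ha)) hnd.2]

-- PySem.Set.add skips a present element and keeps membership.
theorem set_add_of_mem {α : Type} [BEq α] [LawfulBEq α] (s : PySem.Set α) (x : α)
    (h : x ∈ s) : PySem.Set.add s x = s := by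
  simp [PySem.Set.add, h]

theorem mem_set_add {α : Type} [BEq α] [LawfulBEq α] (s : PySem.Set α) (x c : α)
    (h : c ∈ s) : c ∈ PySem.Set.add s x := by
  unfold PySem.Set.add
  split
  · exact h
  · exact List.mem_append_left _ h

-- Folding Set.add over a list skips elements already present.
theorem foldl_add_filter {α : Type} [BEq α] [LawfulBEq α] (c : α) :
    ∀ (t : List α) (s : PySem.Set α), c ∈ s →
      t.foldl PySem.Set.add s = (t.filter (fun x => !(x == c))).foldl PySem.Set.add s := by
  intro t
  induction t with
  | nil => intro s _; rfl
  | cons x xs ih =>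
    intro s hs
    by_cases hx : x = c
    · subst hx
      simpa [set_add_of_mem s x hs] using ih s hs
    · simp only [List.filter_cons, List.foldl_cons]
      rw [if_pos (by simp [hx]), List.foldl_cons]
      exact ih _ (mem_set_add s x c hs)

-- Folding Set.add over elements all distinct from the head c leaves c prepended.
theorem foldl_add_cons {α : Type} [BEq α] [LawfulBEq α] :
    ∀ (t : List α) (s : PySem.Set α) (c : α), c ∉ t →
      t.foldl PySem.Set.add (c :: s) = c :: t.foldl PySem.Set.add s := by
  intro t
  induction t with
  | nil => intro s c _; rfl
  | cons x xs ih =>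
    intro s c hc
    have hxc : x ≠ c := fun h => hc (by simp [h])
    have : PySem.Set.add (c :: s) x = c :: PySem.Set.add s x := by
      unfold PySem.Set.add
      simp only [PySem.Set.contains_eq_listContains, List.contains_cons]
      have : (x == c) = false := by simpa using hxc
      rw [this]
      split <;> simp_all
    simp only [List.foldl_cons, this]
    exact ih _ c (fun h => hc (List.mem_cons_of_mem _ h))

-- First-occurrence dedup peels the head and recurses on the head-free remainder of the tail.
theorem ofList_cons_filter {α : Type} [BEq α] [LawfulBEq α] (c : α) (t : List α) :
    PySem.Set.ofList (c :: t) = c :: PySem.Set.ofList (t.filter (fun x => !(x == c))) := by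
  have hmem : c ∉ t.filter (fun x => !(x == c)) := by
    simp [List.mem_filter]
  have h1 : PySem.Set.ofList (c :: t) = t.foldl PySem.Set.add [c] := by
    rw [PySem.Set.ofList_eq_foldl]
    rfl
  rw [h1, foldl_add_filter c t [c] (List.mem_singleton.mpr rfl),
    foldl_add_cons _ _ _ hmem, PySem.Set.ofList_eq_foldl]

-- The B loop, characterised: it appends to the accumulator exactly the comprehension shape,
-- with each distinct letter's count taken in the remaining suffix.
theorem excess_letters_loop_items (threshold : Int) :
    ∀ (rest : List Char) (d : PySem.Dict String Int),
      (∀ a ∈ rest, d.contains (String.ofList [a]) = false) →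
      (excess_letters_loop threshold rest d).items
        = d.items ++ (PySem.Set.ofList rest).filterMap
            (fun c => if 0 < (rest.count c : Int) - threshold
                      then some (String.ofList [c], (rest.count c : Int) - threshold) else none) := by
  intro rest
  induction hn : rest.length using Nat.strong_induction_on generalizing rest with
  | _ n ih =>
  intro d hfresh
  match rest with
  | [] => simp [excess_letters_loop, PySem.Set.ofList]
  | c :: tail =>
    have hlen : (c :: tail).length
        = ((c :: tail).filter (fun x => x == c)).length
          + ((c :: tail).filter (fun x => !(x == c))).length :=
      List.length_eq_length_filter_add _
    have hcnt : (c :: tail).count c = ((c :: tail).filter (fun x => x == c)).length :=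
      List.count_eq_length_filter
    have hstrip : (c :: tail).filter (fun x => !(x == c)) = tail.filter (fun x => !(x == c)) := by
      simp
    have hcount : ((c :: tail).length : Int) - ((tail.filter (fun x => !(x == c))).length : Int)
        = ((c :: tail).count c : Int) := by
      rw [hstrip] at hlen
      omega
    have hlt : (tail.filter (fun x => !(x == c))).length < n := by
      subst hn
      simp only [List.length_cons]
      exact Nat.lt_succ_of_le (List.length_filter_le _ _)
    have hcountf : ∀ c' ∈ tail.filter (fun x => !(x == c)),
        (tail.filter (fun x => !(x == c))).count c' = (c :: tail).count c' := by
      intro c' hc'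
      have hne : c' ≠ c := by
        have := (List.mem_filter.mp hc').2
        simpa using this
      rw [List.count_filter (by simp [hne])]
      simp [Ne.symm hne]
    rw [excess_letters_loop]
    rw [hstrip, hcount]
    rw [ih _ hlt _ rfl _ (by
      intro a ha
      have hne : ¬ (String.ofList [a] == String.ofList [c]) := by
        have := (List.mem_filter.mp ha).2
        simp only [Bool.not_eq_eq_eq_not, Bool.not_true, beq_eq_false_iff_ne] at this
        simp only [beq_iff_eq]
        intro h
        exact this (by simpa using congrArg String.toList h)
      split
      · rw [PySem.Dict.contains_insert]
        simp only [Bool.or_eq_false_iff]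
        exact ⟨by simpa using hne, hfresh a (List.mem_cons_of_mem _ (List.mem_of_mem_filter ha))⟩
      · exact hfresh a (List.mem_cons_of_mem _ (List.mem_of_mem_filter ha)))]
    rw [ofList_cons_filter]
    simp only [List.filterMap_cons]
    have hcongr : ((PySem.Set.ofList (tail.filter (fun x => !(x == c)))).filterMap
          (fun c' => if 0 < ((tail.filter (fun x => !(x == c))).count c' : Int) - threshold
                     then some (String.ofList [c'], ((tail.filter (fun x => !(x == c))).count c' : Int) - threshold) else none))
        = ((PySem.Set.ofList (tail.filter (fun x => !(x == c)))).filterMap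
          (fun c' => if 0 < ((c :: tail).count c' : Int) - threshold
                     then some (String.ofList [c'], ((c :: tail).count c' : Int) - threshold) else none)) := by
      apply List.filterMap_congr
      intro c' hc'
      rw [hcountf c' (by simpa [PySem.Set.mem_ofList] using hc')]
    rw [hcongr]
    by_cases hp : 0 < ((c :: tail).count c : Int) - threshold
    · rw [if_pos hp, if_pos hp,
        PySem.Dict.items_insert_of_not_contains _ _ (hfresh c List.mem_cons_self)]
      simp [List.append_assoc]
    · have h1 : ¬ threshold ≤ ((tail.count c : Int)) := by
        simp only [List.count_cons_self] at hp
        push_cast at hp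
        omega
      simp [h1]

-- ===== VERDICT (by name: the statement is the Claim_ definition above) =====
theorem excess_letters_spec : Claim_equal_excess_letters := by
  intro string _
  unfold Spec_excess_letters excess_letters excess_letters_alt
  simp only [PySem.Dict.keys_counter]
  rw [items_foldl_insert_if
      (PySem.Set.ofList string.toList)
      (fun c => String.ofList [c])
      (fun c => 0 < (PySem.Dict.counter string.toList).getD c 0
                    - PySem.Int.floordiv (PySem.Str.len string) 4)
      (fun c => (PySem.Dict.counter string.toList).getD c 0
                    - PySem.Int.floordiv (PySem.Str.len string) 4)
      PySem.Dict.empty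
      (fun a _ => rfl)
      (List.Nodup.map (fun a b h => by
        simpa using congrArg String.toList h) (PySem.Set.nodup_ofList string.toList)),
    excess_letters_loop_items _ _ _ (fun a _ => rfl)]
  simp only [PySem.Dict.empty, List.nil_append, PySem.Dict.getD_counter]
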